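-- pv_equiv track=rewrite | github.com/UsernameTron/Content-Generator | anti_pattern_training.py | detect_formulaic_transitions
-- ===== SOURCE A (Python) =====
-- from typing import List, Dict, Any, Tuple, Optional
--
-- FORMULAIC_TRANSITIONS = [
--     "firstly",
--     "secondly",
--     "thirdly",
--     "lastly",
--     "in conclusion",
--     "to summarize",
--     "to sum it up",
--     "in summary",
--     "to wrap up",
--     "moving on to",
--     "turning to",
--     "shifting gears to",
--     "on one hand",
--     "on the other hand",
--     "furthermore",
--     "moreover",
--     "additionally",
--     "in addition",
-- ]
--
-- def detect_formulaic_transitions(text: str) -> List[Tuple[str, int]]: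
--     """
--     Detect formulaic transitions in the text and return them with their positions.
--
--     Args:
--         text: The text to analyze
--
--     Returns:
--         List of tuples containing (transition, position)
--     """
--     text_lower = text.lower()
--     matches = []
--
--     for transition in FORMULAIC_TRANSITIONS:
--         start_pos = 0
--         while start_pos < len(text_lower):
--             pos = text_lower.find(transition, start_pos)
--             if pos == -1:
--                 break
--             matches.append((transition, pos))
--             start_pos = pos + len(transition)
--
--     return matches
-- ===== SOURCE B (Python) =====
-- from typing import List, Tuple
--
-- FORMULAIC_TRANSITIONS = [
--     "firstly",
--     "secondly",
--     "thirdly",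
--     "lastly",
--     "in conclusion",
--     "to summarize",
--     "to sum it up",
--     "in summary",
--     "to wrap up",
--     "moving on to",
--     "turning to",
--     "shifting gears to",
--     "on one hand",
--     "on the other hand",
--     "furthermore",
--     "moreover",
--     "additionally",
--     "in addition",
-- ]
--
-- def detect_formulaic_transitions(text: str) -> List[Tuple[str, int]]:
--     """Single position-major scan, then group hits per phrase in canonical order."""
--     text_lower = text.lower()
--     hits = []
--     for i in range(len(text_lower)):
--         for transition in FORMULAIC_TRANSITIONS:
--             if text_lower.startswith(transition, i):
--                 hits.append((transition, i))
--     groups = {}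
--     for transition, i in hits:
--         groups[transition] = groups.get(transition, []) + [i]
--     out = []
--     for transition in FORMULAIC_TRANSITIONS:
--         for i in groups.get(transition, []):
--             out.append((transition, i))
--     return out
-- ===== Notes on version B (the rewrite author's own statement) =====
-- stated objective: alternative
-- what changed: Replaces A's 18 per-phrase find-and-skip rescans of the text by one position-major scan that records every (phrase, position) hit, then groups the hits per phrase in FORMULAIC_TRANSITIONS order (correct because no phrase has a self-overlap border).
import Mathlib
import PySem

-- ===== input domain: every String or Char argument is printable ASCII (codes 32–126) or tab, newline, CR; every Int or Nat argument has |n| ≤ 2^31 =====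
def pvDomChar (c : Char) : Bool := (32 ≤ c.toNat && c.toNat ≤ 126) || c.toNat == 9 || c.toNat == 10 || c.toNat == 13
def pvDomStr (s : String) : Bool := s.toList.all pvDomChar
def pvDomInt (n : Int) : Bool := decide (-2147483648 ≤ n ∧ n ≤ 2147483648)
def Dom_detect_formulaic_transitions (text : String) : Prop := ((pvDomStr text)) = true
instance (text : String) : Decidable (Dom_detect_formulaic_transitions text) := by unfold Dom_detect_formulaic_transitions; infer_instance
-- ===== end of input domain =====

-- B replaces A's 18 repeated find-and-skip scans by one position-major scan plus grouping
-- of the hits per phrase (objective: alternative decomposition, same result).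

def pvTransitions : List String :=
  ["firstly", "secondly", "thirdly", "lastly", "in conclusion", "to summarize",
   "to sum it up", "in summary", "to wrap up", "moving on to", "turning to",
   "shifting gears to", "on one hand", "on the other hand", "furthermore",
   "moreover", "additionally", "in addition"]

-- ===== PORT A =====
-- the inner 'while start_pos < len(text_lower)' loop of A; fuel = tl.length bounds the
-- iteration count (each step advances start_pos by at least 1 for the nonempty phrases used)
def pvFindLoopA (tl : List Char) (t : String) (start fuel : Nat) : List (String × Int) :=
  match fuel with
  | 0 => []
  | fuel + 1 =>
    if start < tl.length then
      let pos := PySem.Chars.findFrom tl t.toList (start : Int) none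
      if pos = -1 then []
      else (t, pos) :: pvFindLoopA tl t (pos.toNat + t.toList.length) fuel
    else []

def detect_formulaic_transitions (text : String) : List (String × Int) :=
  let tl := (PySem.Str.lower text).toList
  pvTransitions.foldl (fun acc t => acc ++ pvFindLoopA tl t 0 tl.length) []

-- ===== PORT B =====
-- 'text_lower.startswith(transition, i)' for 0 ≤ i < len: exact as startswith on the drop
def pvInnerB (tl : List Char) (i : Int) : List (String × Int) :=
  pvTransitions.foldl
    (fun acc t => if PySem.Chars.startswith (tl.drop i.toNat) t.toList then acc ++ [(t, i)] else acc) []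

def detect_formulaic_transitions_alt (text : String) : List (String × Int) :=
  let tl := (PySem.Str.lower text).toList
  let hits := (PySem.List.pyRange 0 (tl.length : Int) 1).foldl (fun acc i => acc ++ pvInnerB tl i) []
  let groups := hits.foldl (fun d p => d.modify p.1 [] (· ++ [p.2])) PySem.Dict.empty
  pvTransitions.foldl (fun acc t => acc ++ (groups.getD t []).map (fun i => (t, i))) []

-- ===== PRECONDITION & SPEC =====
def Spec_detect_formulaic_transitions (text : String) (out : List (String × Int)) : Prop := out = detect_formulaic_transitions_alt text
instance (text : String) (out : List (String × Int)) : Decidable (Spec_detect_formulaic_transitions text out) := by unfold Spec_detect_formulaic_transitions; infer_instance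

-- ===== CLAIM (what is proved, stated in full; the proofs are below) =====
def Claim_equal_detect_formulaic_transitions : Prop := ∀ (text : String), Dom_detect_formulaic_transitions text → Spec_detect_formulaic_transitions text (detect_formulaic_transitions text)

-- ===== LEMMAS AND PROOFS =====

-- a phrase has no nontrivial border (no proper suffix-start that is also a prefix)
def pvNoBorder (t : List Char) : Bool :=
  (List.range t.length).all (fun k => k == 0 || !((t.drop k).isPrefixOf t))

lemma pvTransitions_good :
    pvTransitions.all (fun t => pvNoBorder t.toList && !t.toList.isEmpty) = true := by decide

lemma pvTransitions_nodup : pvTransitions.Nodup := by decide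

lemma pvNoBorder_not_prefix {t : List Char} (h : pvNoBorder t = true) {k : Nat}
    (hk0 : 0 < k) (hkl : k < t.length) : ¬ (t.drop k <+: t) := by
  intro hp
  have := (List.all_eq_true.mp h) k (List.mem_range.mpr hkl)
  simp only [Bool.or_eq_true, beq_iff_eq, Bool.not_eq_eq_eq_not, Bool.not_true] at this
  rcases this with h0 | hnp
  · omega
  · have := List.isPrefixOf_iff_prefix.mpr hp
    rw [hnp] at this
    cases this

-- two occurrences of a border-free pattern cannot overlap
lemma pvNoOverlap {t tl : List Char} (hnb : pvNoBorder t = true) {p q : Nat}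
    (hp : t <+: tl.drop p) (hq : t <+: tl.drop q) (hpq : p < q) (hql : q < p + t.length) :
    False := by
  obtain ⟨r, hr⟩ := hp
  have hk1 : 0 < q - p := by omega
  have hk2 : q - p < t.length := by omega
  have hdq : tl.drop q = t.drop (q - p) ++ r := by
    have : tl.drop q = (tl.drop p).drop (q - p) := by
      rw [List.drop_drop]; congr 1; omega
    rw [this, ← hr, List.drop_append_of_le_length (by omega)]
  have hpre : t.drop (q - p) <+: tl.drop q := by
    rw [hdq]; exact List.prefix_append _ _
  have : t.drop (q - p) <+: t :=
    List.prefix_of_prefix_length_le hpre hq (by simp only [List.length_drop]; omega)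
  exact pvNoBorder_not_prefix hnb hk1 hk2 this

-- A's find-and-skip loop returns exactly (phrase, j) for every occurrence j in [start, n)
lemma pvFindLoopA_eq (tl : List Char) (t : String) (hnb : pvNoBorder t.toList = true)
    (hne : t.toList ≠ []) :
    ∀ fuel start, tl.length - start ≤ fuel →
    pvFindLoopA tl t start fuel =
      ((List.range' start (tl.length - start)).filter
        (fun j => PySem.Chars.startswith (tl.drop j) t.toList)).map (fun (j : Nat) => (t, (j : Int))) := by
  intro fuel
  induction fuel with
  | zero =>
    intro start h
    have h0 : tl.length - start = 0 := by omega
    simp [pvFindLoopA, h0]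
  | succ f ih =>
    intro start h
    by_cases hs : start < tl.length
    · have hk : start ≤ tl.length := le_of_lt hs
      by_cases hneg : PySem.Chars.findFrom tl t.toList (start : Int) none = -1
      · have hno : ¬ t.toList <:+: tl.drop start :=
          (PySem.Chars.findFrom_natCast_eq_neg_one_iff tl t.toList start hk).mp hneg
        have hfil : ∀ j ∈ List.range' start (tl.length - start),
            ¬ PySem.Chars.startswith (tl.drop j) t.toList = true := by
          intro j hj hsw
          have hj' := List.mem_range'_1.mp hj
          have hpre := (PySem.Chars.startswith_iff _ _).mp hsw
          apply hno
          have hdj : tl.drop j = (tl.drop start).drop (j - start) := by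
            rw [List.drop_drop]; congr 1; omega
          rw [hdj] at hpre
          exact hpre.isInfix.trans (List.drop_suffix _ _).isInfix
        rw [List.filter_eq_nil_iff.mpr (fun j hj => by simpa using hfil j hj)]
        simp [pvFindLoopA, hs, hneg]
      · have spec := PySem.Chars.findFrom_natCast_spec tl t.toList start hk hneg
        set pos := PySem.Chars.findFrom tl t.toList (start : Int) none with hposdef
        obtain ⟨hge, hpref, hmin⟩ := spec
        set p := pos.toNat with hpdef
        have hpos0 : (0:Int) ≤ pos := le_trans (by positivity) hge
        have hpcast : (p : Int) = pos := Int.toNat_of_nonneg hpos0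
        have hsp : start ≤ p := by omega
        have htlen : 0 < t.toList.length := List.length_pos_iff.mpr hne
        have hplen : p + t.toList.length ≤ tl.length := by
          have := hpref.length_le
          rw [List.length_drop] at this
          omega
        -- split the index range at p and p + |t|
        have hsplit : List.range' start (tl.length - start) =
            List.range' start (p - start) ++ List.range' p t.toList.length ++
            List.range' (p + t.toList.length) (tl.length - (p + t.toList.length)) := by
          have e1 := List.range'_append (s := start) (m := p - start)
            (n := t.toList.length + (tl.length - (p + t.toList.length))) (step := 1)
          have e2 := List.range'_append (s := p) (m := t.toList.length)
            (n := tl.length - (p + t.toList.length)) (step := 1)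
          simp only [one_mul] at e1 e2
          rw [show start + (p - start) = p from by omega] at e1
          rw [← e2] at e1
          rw [show p - start + (t.toList.length + (tl.length - (p + t.toList.length)))
              = tl.length - start from by omega] at e1
          rw [← e1, List.append_assoc]
        have hfil1 : (List.range' start (p - start)).filter
            (fun j => PySem.Chars.startswith (tl.drop j) t.toList) = [] := by
          apply List.filter_eq_nil_iff.mpr
          intro j hj
          have hj' := List.mem_range'_1.mp hj
          simp only [Bool.not_eq_true]
          rw [← Bool.not_eq_true, PySem.Chars.startswith_iff]
          exact hmin j hj'.1 (by omega)
        have hfil2 : (List.range' p t.toList.length).filter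
            (fun j => PySem.Chars.startswith (tl.drop j) t.toList) = [p] := by
          have hcons : List.range' p t.toList.length = p :: List.range' (p+1) (t.toList.length - 1) := by
            rw [show t.toList.length = (t.toList.length - 1) + 1 from by omega, List.range'_succ]
            simp
          rw [hcons, List.filter_cons]
          rw [if_pos (by rw [PySem.Chars.startswith_iff]; exact hpref)]
          congr 1
          apply List.filter_eq_nil_iff.mpr
          intro j hj
          have hj' := List.mem_range'_1.mp hj
          simp only [Bool.not_eq_true]
          rw [← Bool.not_eq_true, PySem.Chars.startswith_iff]
          intro hq
          exact pvNoOverlap hnb hpref hq (by omega) (by omega)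
        have hstep : pvFindLoopA tl t start (f + 1) =
            (t, pos) :: pvFindLoopA tl t (p + t.toList.length) f := by
          simp only [pvFindLoopA, if_pos hs, ← hposdef, if_neg hneg]
          rw [hpdef]
        rw [hstep, ih (p + t.toList.length) (by omega), hsplit]
        rw [List.filter_append, List.filter_append, hfil1, hfil2]
        simp only [List.map_append, List.map_cons, List.map_nil, List.nil_append, hpcast]
        rfl
    · have h0 : tl.length - start = 0 := by omega
      simp [pvFindLoopA, hs, h0]

-- filter-then-map as a flatMap over the whole index list
lemma pvFilterMapFlatMap {α β : Type} (l : List α) (p : α → Bool) (f : α → β) :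
    (l.filter p).map f = l.flatMap (fun a => if p a then [f a] else []) := by
  induction l with
  | nil => rfl
  | cons a l ih =>
    rw [List.filter_cons, List.flatMap_cons]
    by_cases hp : p a <;> simp [hp, ih]

-- picking one phrase's hits out of the per-position hit list
lemma pvFilterKey (ts : List String) (hnd : ts.Nodup) (t : String) (ht : t ∈ ts)
    (P : String → Bool) (v : Int) :
    ((ts.filter P).map (fun s => (s, v))).filter (fun p => p.1 == t) =
      if P t then [(t, v)] else [] := by
  induction ts with
  | nil => cases ht
  | cons a ts ih =>
    rw [List.nodup_cons] at hnd
    rw [List.filter_cons]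
    rcases List.mem_cons.mp ht with rfl | hts
    · have hrest : ((ts.filter P).map (fun s => (s, v))).filter (fun p => p.1 == t) = [] := by
        apply List.filter_eq_nil_iff.mpr
        intro q hq
        obtain ⟨s, hs, rfl⟩ := List.mem_map.mp hq
        have : s ∈ ts := (List.mem_filter.mp hs).1
        simp only [beq_iff_eq]
        intro hcon
        exact absurd (by simpa using hcon : s = t) (fun h => hnd.1 (h ▸ this))
      by_cases hp : P t <;> simp [hp, hrest]
    · have hne : a ≠ t := fun h => hnd.1 (h ▸ hts)
      by_cases hp : P a <;> simp [hp, hne, ih hnd.2 hts]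

-- per phrase: A's loop result equals B's grouped hits for that phrase
lemma pvPerPhrase (tl : List Char) (t : String) (ht : t ∈ pvTransitions) :
    pvFindLoopA tl t 0 tl.length =
      ((((PySem.List.pyRange 0 (tl.length : Int) 1).foldl
          (fun acc i => acc ++ pvInnerB tl i) []).filter
            (fun p => p.1 == t)).map (fun x => x.2)).map (fun i => (t, i)) := by
  have hgood := (List.all_eq_true.mp pvTransitions_good) t ht
  simp only [Bool.and_eq_true, Bool.not_eq_eq_eq_not, Bool.not_true] at hgood
  have hnb : pvNoBorder t.toList = true := hgood.1
  have hne : t.toList ≠ [] := by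
    intro h; rw [h] at hgood; simp at hgood
  have hinner : ∀ j : Nat, pvInnerB tl ((j : Nat) : Int) =
      (pvTransitions.filter (fun s => PySem.Chars.startswith (tl.drop j) s.toList)).map
        (fun s => (s, (j : Int))) := by
    intro j
    have := PySem.List.foldl_append_if
      (fun s : String => PySem.Chars.startswith (tl.drop ((j : Int)).toNat) s.toList)
      (fun s : String => (s, (j : Int))) pvTransitions []
    unfold pvInnerB
    simpa using this
  have hhits : (PySem.List.pyRange 0 (tl.length : Int) 1).foldl
      (fun acc i => acc ++ pvInnerB tl i) [] =
      (List.range tl.length).flatMap (fun j =>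
        (pvTransitions.filter (fun s => PySem.Chars.startswith (tl.drop j) s.toList)).map
          (fun s => (s, (j : Int)))) := by
    rw [PySem.List.foldl_append_eq_flatMap, List.nil_append,
      PySem.List.pyRange_zero_natCast, List.flatMap_map]
    exact List.flatMap_congr (fun j _ => hinner j)
  rw [hhits, List.filter_flatMap]
  rw [List.flatMap_congr (fun j _ =>
    pvFilterKey pvTransitions pvTransitions_nodup t ht
      (fun s => PySem.Chars.startswith (tl.drop j) s.toList) (j : Int))]
  rw [pvFindLoopA_eq tl t hnb hne tl.length 0 (by omega)]
  rw [Nat.sub_zero, ← List.range_eq_range', pvFilterMapFlatMap]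
  rw [List.map_flatMap, List.map_flatMap]
  apply List.flatMap_congr
  intro j _
  by_cases hp : PySem.Chars.startswith (tl.drop j) t.toList <;> simp [hp]

-- ===== VERDICT (by name: the statement is the Claim_ definition above) =====
theorem detect_formulaic_transitions_spec : Claim_equal_detect_formulaic_transitions := by
  intro text _
  unfold Spec_detect_formulaic_transitions
  unfold detect_formulaic_transitions detect_formulaic_transitions_alt
  rw [PySem.List.foldl_append_eq_flatMap, PySem.List.foldl_append_eq_flatMap,
    List.nil_append, List.nil_append]
  apply List.flatMap_congr
  intro t ht
  rw [pvPerPhrase _ t ht]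
  rw [PySem.Dict.getD_foldl_modify_append]
  simp [PySem.Dict.getD_empty]
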